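-- pv_equiv track=rewrite | github.com/Mitix-EPI/Epitech-All-Projects | Tek2/Math/201yams/bonus/src/Yams/Combination.py | checkFull
-- ===== SOURCE A (Python) =====
-- def checkFull(dies):
--     hasThree = False
--     hasTwo = False
--
--     for i in dies:
--         if dies.count(i) == 3:
--             hasThree = True
--         if dies.count(i) == 2:
--             hasTwo = True
--     if hasThree and hasTwo:
--         return 25
--     return 0
-- ===== SOURCE B (Python) =====
-- def checkFull(dies):
--     # Sort once, then scan the sorted sequence collecting run lengths;
--     # a full house iff some run has length 3 and some run has length 2.
--     runs = []
--     run = 0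
--     prev = None
--     for d in sorted(dies):
--         if run and d == prev:
--             run += 1
--         else:
--             if run:
--                 runs.append(run)
--             run = 1
--             prev = d
--     if run:
--         runs.append(run)
--     return 25 if 3 in runs and 2 in runs else 0
-- ===== Notes on version B (the rewrite author's own statement) =====
-- stated objective: faster
-- what changed: Sorts the dice once and scans the sorted sequence for consecutive run lengths, returning 25 iff both a run of 3 and a run of 2 occur, instead of A's per-element dies.count rescans.
import Mathlib
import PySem

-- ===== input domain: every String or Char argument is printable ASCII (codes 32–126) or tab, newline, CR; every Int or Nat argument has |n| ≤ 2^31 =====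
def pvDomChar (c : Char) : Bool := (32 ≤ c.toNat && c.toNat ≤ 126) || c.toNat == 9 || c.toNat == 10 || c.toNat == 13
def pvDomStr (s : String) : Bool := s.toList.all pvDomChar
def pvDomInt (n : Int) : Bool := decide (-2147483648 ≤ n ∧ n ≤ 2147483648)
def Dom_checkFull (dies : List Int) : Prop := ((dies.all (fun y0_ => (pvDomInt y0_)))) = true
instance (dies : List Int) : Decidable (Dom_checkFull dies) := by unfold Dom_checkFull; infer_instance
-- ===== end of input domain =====

-- B sorts the dice once and scans the sorted sequence for consecutive run lengths,
-- returning 25 iff a run of length 3 and a run of length 2 both occur (instead of A's per-element dies.count rescans).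


-- ===== PORT A =====
def checkFull (dies : List Int) : Int :=
  let st := dies.foldl (fun (st : Bool × Bool) i =>
    (if PySem.List.count dies i == 3 then true else st.1,
     if PySem.List.count dies i == 2 then true else st.2)) (false, false)
  if st.1 && st.2 then 25 else 0

-- ===== PORT B =====
-- loop body of Source B: state = (runs, run, prev); 'if run and d == prev' (prev starts as None)
def stepB (st : List Int × Int × Option Int) (d : Int) : List Int × Int × Option Int :=
  if st.2.1 ≠ 0 ∧ st.2.2 = some d then (st.1, st.2.1 + 1, st.2.2)
  else ((if st.2.1 ≠ 0 then st.1 ++ [st.2.1] else st.1), 1, some d)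

-- the final 'if run: runs.append(run)' flush
def flushB (st : List Int × Int × Option Int) : List Int :=
  if st.2.1 ≠ 0 then st.1 ++ [st.2.1] else st.1

def checkFull_alt (dies : List Int) : Int :=
  let runs := flushB ((PySem.List.sorted dies (fun x => x) false).foldl stepB ([], 0, none))
  if runs.contains 3 && runs.contains 2 then 25 else 0

-- ===== PRECONDITION & SPEC =====
def Spec_checkFull (dies : List Int) (out : Int) : Prop := out = checkFull_alt dies
instance (dies : List Int) (out : Int) : Decidable (Spec_checkFull dies out) := by unfold Spec_checkFull; infer_instance

-- ===== CLAIM (what is proved, stated in full; the proofs are below) =====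
def Claim_equal_checkFull : Prop := ∀ (dies : List Int), Dom_checkFull dies → Spec_checkFull dies (checkFull dies)

-- ===== LEMMAS AND PROOFS =====

-- run-length spec of B's scan: rlGo p r ys continues a current run of value p with length r
def rlGo (p r : Int) : List Int → List Int
  | [] => [r]
  | y :: ys => if y = p then rlGo p (r + 1) ys else r :: rlGo y 1 ys

def rl : List Int → List Int
  | [] => []
  | x :: xs => rlGo x 1 xs

-- B's fold followed by the final flush computes the run lengths
theorem foldl_rlGo (ys : List Int) : ∀ (runs : List Int) (r p : Int), 0 < r →
    flushB (ys.foldl stepB (runs, r, some p)) = runs ++ rlGo p r ys := by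
  induction ys with
  | nil => intro runs r p hr; simp [flushB, rlGo, hr.ne']
  | cons y ys ih =>
    intro runs r p hr
    by_cases h : y = p
    · subst h
      rw [List.foldl_cons, stepB, if_pos ⟨hr.ne', rfl⟩, rlGo, if_pos rfl]
      exact ih runs (r + 1) y (by omega)
    · have hcond : ¬ ((runs, r, some p).2.1 ≠ 0 ∧ (runs, r, some p).2.2 = some y) := by
        rintro ⟨-, hp⟩
        exact h (Option.some.inj hp).symm
      rw [List.foldl_cons, stepB, if_neg hcond, if_pos hr.ne', rlGo, if_neg h]
      rw [ih (runs ++ [r]) 1 y (by omega), List.append_assoc]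
      rfl

theorem flush_foldl_eq_rl (ys : List Int) :
    flushB (ys.foldl stepB ([], 0, none)) = rl ys := by
  cases ys with
  | nil => rfl
  | cons x xs =>
    rw [List.foldl_cons]
    have h0 : stepB ([], 0, none) x = ([], 1, some x) := by simp [stepB]
    rw [h0, rl]
    simpa using foldl_rlGo xs [] 1 x (by omega)

-- membership in rlGo over a sorted tail
theorem mem_rlGo (ys : List Int) : ∀ (p r m : Int), (p :: ys).Pairwise (· ≤ ·) →
    (m ∈ rlGo p r ys ↔ m = r + (ys.count p : Int) ∨ ∃ i ∈ ys, i ≠ p ∧ (ys.count i : Int) = m) := by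
  induction ys with
  | nil => intro p r m _; simp [rlGo]
  | cons y ys ih =>
    intro p r m hp
    rcases List.pairwise_cons.mp hp with ⟨hple, htl⟩
    by_cases h : y = p
    · subst h
      rw [rlGo, if_pos rfl, ih y (r + 1) m htl]
      have hccy : (y :: ys).count y = ys.count y + 1 := List.count_cons_self ..
      constructor
      · rintro (hm | ⟨i, hi, hne, hc⟩)
        · left; rw [hccy]; push_cast; omega
        · right
          exact ⟨i, List.mem_cons_of_mem _ hi, hne,
            by rw [List.count_cons_of_ne (Ne.symm hne)]; exact hc⟩
      · rintro (hm | ⟨i, hi, hne, hc⟩)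
        · left; rw [hccy] at hm; push_cast at hm ⊢; omega
        · rcases List.mem_cons.mp hi with rfl | hi
          · exact absurd rfl hne
          · right
            rw [List.count_cons_of_ne (Ne.symm hne)] at hc
            exact ⟨i, hi, hne, hc⟩
    · have hlt : p < y := lt_of_le_of_ne (hple y (List.mem_cons_self ..)) (Ne.symm h)
      have hyle : ∀ i ∈ ys, y ≤ i := (List.pairwise_cons.mp htl).1
      have hpnot : p ∉ y :: ys := by
        intro hmem
        rcases List.mem_cons.mp hmem with rfl | hmem
        · exact absurd rfl h
        · exact absurd (hyle p hmem) (by omega)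
      have hcnt : (y :: ys).count p = 0 := List.count_eq_zero.mpr hpnot
      rw [rlGo, if_neg h]
      have hrec := ih y 1 m htl
      have hccy : (y :: ys).count y = ys.count y + 1 := List.count_cons_self ..
      constructor
      · intro hm
        rcases List.mem_cons.mp hm with rfl | hm
        · left; rw [hcnt]; push_cast; omega
        · rcases hrec.mp hm with hm1 | ⟨i, hi, hne, hc⟩
          · right
            exact ⟨y, List.mem_cons_self .., Ne.symm (by omega), by rw [hccy]; push_cast; omega⟩
          · right
            refine ⟨i, List.mem_cons_of_mem _ hi, ?_, ?_⟩
            · have := hyle i hi; omega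
            · rw [List.count_cons_of_ne (Ne.symm hne)]; exact hc
      · rintro (hm | ⟨i, hi, hne, hc⟩)
        · rw [hcnt] at hm; push_cast at hm
          rw [show m = r by omega]; exact List.mem_cons_self ..
        · rcases List.mem_cons.mp hi with rfl | hi
          · rw [hccy] at hc
            exact List.mem_cons_of_mem _ (hrec.mpr (.inl (by push_cast at hc ⊢; omega)))
          · by_cases hiy : i = y
            · subst hiy
              rw [hccy] at hc
              exact List.mem_cons_of_mem _ (hrec.mpr (.inl (by push_cast at hc ⊢; omega)))
            · rw [List.count_cons_of_ne (Ne.symm hiy)] at hc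
              exact List.mem_cons_of_mem _ (hrec.mpr (.inr ⟨i, hi, hiy, hc⟩))

theorem mem_rl (zs : List Int) (m : Int) (hs : zs.Pairwise (· ≤ ·)) :
    m ∈ rl zs ↔ ∃ i ∈ zs, (zs.count i : Int) = m := by
  cases zs with
  | nil => simp [rl]
  | cons x xs =>
    rw [rl, mem_rlGo xs x 1 m hs]
    have hccx : (x :: xs).count x = xs.count x + 1 := List.count_cons_self ..
    constructor
    · rintro (hm | ⟨i, hi, hne, hc⟩)
      · exact ⟨x, List.mem_cons_self .., by rw [hccx]; push_cast; omega⟩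
      · exact ⟨i, List.mem_cons_of_mem _ hi,
          by rw [List.count_cons_of_ne (Ne.symm hne)]; exact hc⟩
    · rintro ⟨i, hi, hc⟩
      rcases List.mem_cons.mp hi with rfl | hi
      · left; rw [hccx] at hc; push_cast at hc ⊢; omega
      · by_cases hne : i = x
        · subst hne; left; rw [hccx] at hc; push_cast at hc ⊢; omega
        · right
          rw [List.count_cons_of_ne (Ne.symm hne)] at hc
          exact ⟨i, hi, hne, hc⟩

-- ===== VERDICT (by name: the statement is the Claim_ definition above) =====
theorem checkFull_spec : Claim_equal_checkFull := by
  intro dies _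
  unfold Spec_checkFull checkFull checkFull_alt
  rw [PySem.List.foldl_prod_mk
      (f := fun ok i => if PySem.List.count dies i == 3 then true else ok)
      (g := fun ok i => if PySem.List.count dies i == 2 then true else ok),
    PySem.List.foldl_if_true_eq, PySem.List.foldl_if_true_eq]
  set ys := PySem.List.sorted dies (fun x => x) false with hys
  have hperm : ys.Perm dies := PySem.List.sorted_perm ..
  have hpair : ys.Pairwise (· ≤ ·) := PySem.List.sorted_pairwise ..
  rw [flush_foldl_eq_rl]
  have key : ∀ K : Nat, (rl ys).contains ((K : Nat) : Int)
      = dies.any (fun i => PySem.List.count dies i == K) := by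
    intro K
    rw [Bool.eq_iff_iff]
    rw [List.contains_iff_mem, mem_rl ys _ hpair]
    simp only [List.any_eq_true, beq_iff_eq, PySem.List.count_eq]
    constructor
    · rintro ⟨i, hi, hc⟩
      exact ⟨i, hperm.mem_iff.mp hi, by rw [← hperm.count_eq]; exact_mod_cast hc⟩
    · rintro ⟨i, hi, hc⟩
      exact ⟨i, hperm.mem_iff.mpr hi, by rw [hperm.count_eq, hc]⟩
  have k3 : (rl ys).contains (3 : Int) = dies.any (fun i => PySem.List.count dies i == 3) := by
    exact_mod_cast key 3
  have k2 : (rl ys).contains (2 : Int) = dies.any (fun i => PySem.List.count dies i == 2) := by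
    exact_mod_cast key 2
  simp only [Bool.false_or, k3, k2]
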